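-- pv_equiv track=rewrite | github.com/MajorVicious/OpenClassRoom | robot_propre.py | lecteur
-- ===== SOURCE A (Python) =====
-- def lecteur(direction):
--     direction = direction.upper()
--     numbers = "123456789"
--     rapide = []
--     multiple = ""
--     nouvelle_direction = ""
--     for element in direction:
--         rapide.append(element)
--         for item in rapide:
--             if item in numbers:
--                 multiple = item
--             else:
--                 nouvelle_direction = item
--     return nouvelle_direction, multiple
-- ===== SOURCE B (Python) =====
-- def lecteur(direction):
--     direction = direction.upper()
--     numbers = "123456789"
--     multiple = next((c for c in reversed(direction) if c in numbers), "")
--     nouvelle_direction = next((c for c in reversed(direction) if c not in numbers), "")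
--     return nouvelle_direction, multiple
-- ===== Notes on version B (the rewrite author's own statement) =====
-- stated objective: faster
-- what changed: Replaces A's quadratic forward pass that re-scans the accumulated prefix on every character with two independent reverse searches that stop at the first hit (last digit, last non-digit).
import Mathlib
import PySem

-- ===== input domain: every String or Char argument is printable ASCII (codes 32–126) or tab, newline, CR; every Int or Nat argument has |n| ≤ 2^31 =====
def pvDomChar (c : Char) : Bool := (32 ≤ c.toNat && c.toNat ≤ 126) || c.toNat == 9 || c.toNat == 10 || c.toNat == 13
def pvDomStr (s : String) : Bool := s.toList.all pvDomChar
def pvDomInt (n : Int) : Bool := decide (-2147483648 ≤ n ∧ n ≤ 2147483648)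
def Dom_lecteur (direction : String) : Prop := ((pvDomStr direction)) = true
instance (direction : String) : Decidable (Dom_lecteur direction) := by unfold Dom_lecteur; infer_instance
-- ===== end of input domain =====

-- B replaces A's quadratic forward pass (re-scanning the accumulated prefix for every character)
-- with two independent reverse searches stopping at the first hit; return value only, no side effects.

-- ===== PORT A =====
-- `item in numbers` for the single character item
def pvDig (c : Char) : Bool := ("123456789".toList).contains c

-- the inner `for item in rapide` loop, state (multiple, nouvelle_direction)
def lecInner (rapide : List Char) (m n : String) : String × String :=
  rapide.foldl (fun (s : String × String) item =>
    if pvDig item then (String.singleton item, s.2) else (s.1, String.singleton item)) (m, n)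

-- the outer `for element in direction` loop, state (rapide, multiple, nouvelle_direction)
def lecOuter (chars : List Char) : List Char × String × String :=
  chars.foldl (fun (st : List Char × String × String) element =>
    let rapide := st.1 ++ [element]
    let mn := lecInner rapide st.2.1 st.2.2
    (rapide, mn.1, mn.2)) ([], "", "")

def lecteur (direction : String) : String × String :=
  let st := lecOuter (PySem.Str.upper direction).toList
  (st.2.2, st.2.1)

-- ===== PORT B =====
-- next((c for c in reversed(direction) if <test>), "")
def lecFindRev (chars : List Char) (p : Char → Bool) : String :=
  match chars.reverse.find? p with
  | some c => String.singleton c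
  | none => ""

def lecteur_alt (direction : String) : String × String :=
  let d := (PySem.Str.upper direction).toList
  let multiple := lecFindRev d (fun c => pvDig c)
  let nouvelle_direction := lecFindRev d (fun c => !pvDig c)
  (nouvelle_direction, multiple)

-- ===== PRECONDITION & SPEC =====
def Spec_lecteur (direction : String) (out : String × String) : Prop := out = lecteur_alt direction
instance (direction : String) (out : String × String) : Decidable (Spec_lecteur direction out) := by unfold Spec_lecteur; infer_instance

-- ===== CLAIM (what is proved, stated in full; the proofs are below) =====
def Claim_equal_lecteur : Prop := ∀ (direction : String), Dom_lecteur direction → Spec_lecteur direction (lecteur direction)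

-- ===== LEMMAS AND PROOFS =====

-- "last match, else default" as a forward fold
def lastM (p : Char → Bool) (l : List Char) (d : String) : String :=
  l.foldl (fun acc c => if p c then String.singleton c else acc) d

theorem lastM_cons (p : Char → Bool) (c : Char) (l : List Char) (d : String) :
    lastM p (c :: l) d = lastM p l (if p c then String.singleton c else d) := by
  simp [lastM, List.foldl_cons]

-- characterisation: lastM is the first match of the reversed list, else the default
theorem lastM_char (p : Char → Bool) (l : List Char) (d : String) :
    lastM p l d = (match l.reverse.find? p with
                   | some c => String.singleton c
                   | none => d) := by
  induction l generalizing d with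
  | nil => simp [lastM]
  | cons c l ih =>
    rw [lastM_cons, ih]
    rw [List.reverse_cons, List.find?_append]
    cases h : l.reverse.find? p with
    | some x => simp
    | none =>
      simp only [Option.none_or]
      by_cases hp : p c <;> simp [List.find?, hp]

theorem lastM_append (p : Char → Bool) (x y : List Char) (d : String) :
    lastM p (x ++ y) d = lastM p y (lastM p x d) := by
  simp [lastM, List.foldl_append]

theorem lastM_idem (p : Char → Bool) (l : List Char) (d : String) :
    lastM p l (lastM p l d) = lastM p l d := by
  simp only [lastM_char]
  cases l.reverse.find? p <;> simp

theorem lastM_absorb (p : Char → Bool) (x y : List Char) (d : String) :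
    lastM p (x ++ y) (lastM p x d) = lastM p (x ++ y) d := by
  rw [lastM_append, lastM_idem, ← lastM_append]

theorem lecInner_eq (l : List Char) (m n : String) :
    lecInner l m n = (lastM pvDig l m, lastM (fun c => !pvDig c) l n) := by
  induction l generalizing m n with
  | nil => simp [lecInner, lastM]
  | cons c l ih =>
    have h1 : lecInner (c :: l) m n
        = if pvDig c then lecInner l (String.singleton c) n
          else lecInner l m (String.singleton c) := by
      by_cases h : pvDig c <;> simp [lecInner, h]
    rw [h1, lastM_cons, lastM_cons]
    by_cases h : pvDig c <;> simp [h, ih]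

theorem lecOuter_inv (rest r : List Char) (m n : String)
    (hm : m = lastM pvDig r m) (hn : n = lastM (fun c => !pvDig c) r n) :
    rest.foldl (fun (st : List Char × String × String) element =>
        let rapide := st.1 ++ [element]
        let mn := lecInner rapide st.2.1 st.2.2
        (rapide, mn.1, mn.2)) (r, m, n)
      = (r ++ rest, lastM pvDig (r ++ rest) m, lastM (fun c => !pvDig c) (r ++ rest) n) := by
  induction rest generalizing r m n with
  | nil => simp [← hm, ← hn]
  | cons e rest ih =>
    rw [List.foldl_cons]
    have hstep : (let rapide := (r, m, n).1 ++ [e]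
        let mn := lecInner rapide (r, m, n).2.1 (r, m, n).2.2
        ((rapide, mn.1, mn.2) : List Char × String × String))
        = (r ++ [e], lastM pvDig (r ++ [e]) m, lastM (fun c => !pvDig c) (r ++ [e]) n) := by
      simp [lecInner_eq]
    rw [hstep, ih (r ++ [e]) _ _ (by rw [lastM_idem]) (by rw [lastM_idem])]
    have e1 : r ++ [e] ++ rest = r ++ e :: rest := by simp
    rw [lastM_absorb, lastM_absorb, e1]

theorem lecOuter_eq (chars : List Char) :
    lecOuter chars = (chars, lastM pvDig chars "", lastM (fun c => !pvDig c) chars "") := by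
  have := lecOuter_inv chars [] "" "" (by simp [lastM]) (by simp [lastM])
  simpa [lecOuter] using this

theorem lastM_empty_eq_findRev (p : Char → Bool) (l : List Char) :
    lastM p l "" = lecFindRev l p := by
  rw [lastM_char, lecFindRev]

-- ===== VERDICT (by name: the statement is the Claim_ definition above) =====
theorem lecteur_spec : Claim_equal_lecteur := by
  intro direction _
  show lecteur direction = lecteur_alt direction
  rw [lecteur, lecteur_alt, lecOuter_eq]
  simp [lastM_empty_eq_findRev]
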